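-- pv_equiv track=rewrite | github.com/SandersWifeBernie/Burger-Flipping-Simulator- | burgee/affinityCalculator.py | getAlistarAffinity
-- ===== SOURCE A (Python) =====
-- def getAlistarAffinity (food):
--     affinity = 0
--     for item in food:
--         item = item.lower()
--         if "lettuce" in item:
--             affinity = affinity + 20
--         elif "tomato" in item:
--             affinity = affinity + 25
--         elif "mustard" in item:
--             affinity = affinity + 15
--         elif "fancy mustard" in item:
--             affinity = affinity + 25
--         elif "ketchup" in item:
--             affinity = affinity - 10
--         elif "cheese" in item:
--             affinity = affinity + 15
--         elif "beef patty" in item: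
--             affinity = affinity - 10
--         elif "buns" in item:
--             affinity = affinity + 15
--         elif "onions" in item:
--             affinity = affinity - 30
--         elif "turkey patty" in item:
--             affinity = affinity + 30
--         elif "hot sauce" in item:
--             affinity = affinity - 5
--         elif "bacon" in item:
--             affinity = affinity - 10
--         elif "pickles" in item:
--             affinity = affinity - 5
--         elif "mayo" in item:
--             affinity = affinity + 25
--         elif "relish" in item:
--             affinity = affinity - 15
--     return affinity
-- ===== SOURCE B (Python) =====
-- PAIRS = [
--     ("lettuce", 20),
--     ("tomato", 25),
--     ("mustard", 15),
--     ("fancy mustard", 25),  # kept in original chain order; unreachable after "mustard"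
--     ("ketchup", -10),
--     ("cheese", 15),
--     ("beef patty", -10),
--     ("buns", 15),
--     ("onions", -30),
--     ("turkey patty", 30),
--     ("hot sauce", -5),
--     ("bacon", -10),
--     ("pickles", -5),
--     ("mayo", 25),
--     ("relish", -15),
-- ]
--
-- def getAlistarAffinity(food):
--     # Sieve: one pass per rule over the shrinking pool of unmatched items.
--     remaining = [item.lower() for item in food]
--     affinity = 0
--     for sub, pts in PAIRS:
--         affinity += pts * sum(1 for it in remaining if sub in it)
--         remaining = [it for it in remaining if sub not in it]
--     return affinity
-- ===== Notes on version B (the rewrite author's own statement) =====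
-- stated objective: alternative
-- what changed: Inverts the loop nesting into a sieve: B iterates over the rules in priority order, each pass adding pts times the count of still-unmatched lowercased items containing the substring and discarding those items, instead of A's per-item elif chain; correct because addition is commutative so each item still contributes exactly its first matching rule's points.
import Mathlib
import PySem

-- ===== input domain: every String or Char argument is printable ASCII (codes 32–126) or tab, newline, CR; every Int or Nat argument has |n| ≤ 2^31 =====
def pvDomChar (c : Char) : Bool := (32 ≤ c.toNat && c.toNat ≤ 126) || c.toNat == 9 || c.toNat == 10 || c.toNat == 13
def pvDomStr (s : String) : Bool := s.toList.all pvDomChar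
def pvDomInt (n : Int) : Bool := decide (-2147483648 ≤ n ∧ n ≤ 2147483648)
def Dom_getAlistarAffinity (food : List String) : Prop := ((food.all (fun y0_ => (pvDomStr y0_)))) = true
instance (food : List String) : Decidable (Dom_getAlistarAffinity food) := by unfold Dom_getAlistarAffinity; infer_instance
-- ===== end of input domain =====

set_option maxHeartbeats 1000000


-- ===== PORT A =====
-- one honest line: B inverts the loop nesting into a rule-by-rule sieve over a shrinking
-- pool of unmatched items (alternative decomposition, same cost).
def pvAStep (affinity : Int) (item : String) : Int :=
  let item := PySem.Str.lower item
  if PySem.Str.isIn "lettuce" item then affinity + 20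
  else if PySem.Str.isIn "tomato" item then affinity + 25
  else if PySem.Str.isIn "mustard" item then affinity + 15
  else if PySem.Str.isIn "fancy mustard" item then affinity + 25
  else if PySem.Str.isIn "ketchup" item then affinity - 10
  else if PySem.Str.isIn "cheese" item then affinity + 15
  else if PySem.Str.isIn "beef patty" item then affinity - 10
  else if PySem.Str.isIn "buns" item then affinity + 15
  else if PySem.Str.isIn "onions" item then affinity - 30
  else if PySem.Str.isIn "turkey patty" item then affinity + 30
  else if PySem.Str.isIn "hot sauce" item then affinity - 5
  else if PySem.Str.isIn "bacon" item then affinity - 10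
  else if PySem.Str.isIn "pickles" item then affinity - 5
  else if PySem.Str.isIn "mayo" item then affinity + 25
  else if PySem.Str.isIn "relish" item then affinity - 15
  else affinity

def getAlistarAffinity (food : List String) : Int :=
  food.foldl pvAStep 0

-- ===== PORT B =====
def pvPairs : List (String × Int) :=
  [("lettuce", 20), ("tomato", 25), ("mustard", 15), ("fancy mustard", 25),
   ("ketchup", -10), ("cheese", 15), ("beef patty", -10), ("buns", 15),
   ("onions", -30), ("turkey patty", 30), ("hot sauce", -5), ("bacon", -10),
   ("pickles", -5), ("mayo", 25), ("relish", -15)]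

-- one sieve pass for rule p: add pts * (matching count), drop the matched items
def pvSieveStep (st : List String × Int) (p : String × Int) : List String × Int :=
  ((st.1.filter (fun it => !(PySem.Str.isIn p.1 it))),
   st.2 + p.2 * ((st.1.filter (fun it => PySem.Str.isIn p.1 it)).length : Int))

def getAlistarAffinity_alt (food : List String) : Int :=
  let remaining := food.map PySem.Str.lower
  (pvPairs.foldl pvSieveStep (remaining, 0)).2

-- ===== PRECONDITION & SPEC =====
def Spec_getAlistarAffinity (food : List String) (out : Int) : Prop := out = getAlistarAffinity_alt food
instance (food : List String) (out : Int) : Decidable (Spec_getAlistarAffinity food out) := by unfold Spec_getAlistarAffinity; infer_instance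

-- ===== CLAIM (what is proved, stated in full; the proofs are below) =====
def Claim_equal_getAlistarAffinity : Prop := ∀ (food : List String), Dom_getAlistarAffinity food → Spec_getAlistarAffinity food (getAlistarAffinity food)

-- ===== LEMMAS AND PROOFS =====
-- first-match value of an item against an ordered rule list (proof device linking the two ports)
def pvFirstMatch : List (String × Int) → String → Int
  | [], _ => 0
  | (sub, pts) :: rest, item =>
      if PySem.Str.isIn sub item then pts else pvFirstMatch rest item

theorem pvFm_cons (sub : String) (pts : Int) (rest : List (String × Int)) (item : String) :
    pvFirstMatch ((sub, pts) :: rest) item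
      = if PySem.Str.isIn sub item then pts else pvFirstMatch rest item := rfl

theorem pvFm_nil (item : String) : pvFirstMatch [] item = 0 := rfl

theorem pvStep_eq (aff : Int) (item : String) :
    pvAStep aff item = aff + pvFirstMatch pvPairs (PySem.Str.lower item) := by
  simp only [pvAStep, pvPairs]
  rw [pvFm_cons, pvFm_cons, pvFm_cons, pvFm_cons, pvFm_cons, pvFm_cons, pvFm_cons, pvFm_cons,
      pvFm_cons, pvFm_cons, pvFm_cons, pvFm_cons, pvFm_cons, pvFm_cons, pvFm_cons, pvFm_nil]
  generalize PySem.Str.isIn "lettuce" (PySem.Str.lower item) = b1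
  generalize PySem.Str.isIn "tomato" (PySem.Str.lower item) = b2
  generalize PySem.Str.isIn "mustard" (PySem.Str.lower item) = b3
  generalize PySem.Str.isIn "fancy mustard" (PySem.Str.lower item) = b4
  generalize PySem.Str.isIn "ketchup" (PySem.Str.lower item) = b5
  generalize PySem.Str.isIn "cheese" (PySem.Str.lower item) = b6
  generalize PySem.Str.isIn "beef patty" (PySem.Str.lower item) = b7
  generalize PySem.Str.isIn "buns" (PySem.Str.lower item) = b8
  generalize PySem.Str.isIn "onions" (PySem.Str.lower item) = b9
  generalize PySem.Str.isIn "turkey patty" (PySem.Str.lower item) = b10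
  generalize PySem.Str.isIn "hot sauce" (PySem.Str.lower item) = b11
  generalize PySem.Str.isIn "bacon" (PySem.Str.lower item) = b12
  generalize PySem.Str.isIn "pickles" (PySem.Str.lower item) = b13
  generalize PySem.Str.isIn "mayo" (PySem.Str.lower item) = b14
  generalize PySem.Str.isIn "relish" (PySem.Str.lower item) = b15
  cases b1 with
  | true => rfl
  | false =>
    cases b2 with
    | true => rfl
    | false =>
      cases b3 with
      | true => rfl
      | false =>
        cases b4 with
        | true => rfl
        | false =>
          cases b5 with
          | true => rfl
          | false =>
            cases b6 with
            | true => rfl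
            | false =>
              cases b7 with
              | true => rfl
              | false =>
                cases b8 with
                | true => rfl
                | false =>
                  cases b9 with
                  | true => rfl
                  | false =>
                    cases b10 with
                    | true => rfl
                    | false =>
                      cases b11 with
                      | true => rfl
                      | false =>
                        cases b12 with
                        | true => rfl
                        | false =>
                          cases b13 with
                          | true => rfl
                          | false =>
                            cases b14 with
                            | true => rfl
                            | false =>
                              cases b15 with
                              | true => rfl
                              | false =>
                                show aff = aff + 0
                                omega

-- A's fold is the sum of per-item first-match values
theorem pvFoldl_sum (f : String → Int) (food : List String) (aff : Int) :
    food.foldl (fun a it => a + f it) aff = aff + (food.map f).sum := by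
  induction food generalizing aff with
  | nil => simp
  | cons x xs ih => simp [List.foldl, ih]; ring

theorem pvA_sum (food : List String) (aff : Int) :
    food.foldl pvAStep aff = aff + (food.map (fun it => pvFirstMatch pvPairs (PySem.Str.lower it))).sum := by
  have h : food.foldl pvAStep aff
      = food.foldl (fun a it => a + pvFirstMatch pvPairs (PySem.Str.lower it)) aff := by
    induction food generalizing aff with
    | nil => rfl
    | cons x xs ih => simp only [List.foldl, pvStep_eq]; exact ih _
  rw [h, pvFoldl_sum]

-- distributing one sieve pass over the per-item sums
theorem pvSplit (s : String) (p : Int) (rest : List (String × Int)) (L : List String) :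
    (L.map (pvFirstMatch ((s, p) :: rest))).sum
      = p * ((L.filter (fun it => PySem.Str.isIn s it)).length : Int)
        + ((L.filter (fun it => !(PySem.Str.isIn s it))).map (pvFirstMatch rest)).sum := by
  induction L with
  | nil => simp
  | cons x xs ih =>
    simp only [List.map_cons, List.sum_cons, pvFm_cons, List.filter_cons]
    cases hx : PySem.Str.isIn s x
    · simp only [hx, Bool.not_false, Bool.false_eq_true, if_false, if_true,
        List.map_cons, List.sum_cons, ih]
      ring
    · simp only [hx, Bool.not_true, Bool.false_eq_true, if_false, if_true,
        List.map_cons, List.sum_cons, List.length_cons, ih]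
      push_cast
      ring

-- B's sieve computes the same total as the per-item first-match sum
theorem pvSieve_eq (P : List (String × Int)) (L : List String) (t : Int) :
    (P.foldl pvSieveStep (L, t)).2 = t + (L.map (pvFirstMatch P)).sum := by
  induction P generalizing L t with
  | nil =>
    have h : pvFirstMatch [] = fun _ : String => (0 : Int) := rfl
    simp [h]
  | cons p rest ih =>
    obtain ⟨s, pts⟩ := p
    simp only [List.foldl, pvSieveStep]
    rw [ih, pvSplit]
    ring

-- ===== VERDICT (by name: the statement is the Claim_ definition above) =====
theorem getAlistarAffinity_spec : Claim_equal_getAlistarAffinity := by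
  intro food _
  unfold Spec_getAlistarAffinity getAlistarAffinity getAlistarAffinity_alt
  rw [pvA_sum, pvSieve_eq, List.map_map]
  rfl
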